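-- pv_equiv track=rewrite | github.com/mkhvalchik/TREC | passage_retrieval.py | SplitKeywords
-- ===== SOURCE A (Python) =====
-- def SplitKeywords(keywords):
--     out = []
--     for keyword in keywords.split(" AND "):
--         keyword = keyword.replace("(", "")
--         keyword = keyword.replace(")", "")
--         for search_term in keyword.split(" OR "):
--             search_term = search_term.replace("\"", "")
--             out.append(search_term)
--     return out
-- ===== SOURCE B (Python) =====
-- def SplitKeywords(keywords):
--     i = keywords.find(" AND ")
--     if i < 0:
--         return _terms("".join(c for c in keywords if c not in "()"))
--     return _terms("".join(c for c in keywords[:i] if c not in "()")) + SplitKeywords(keywords[i + 5:])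
--
--
-- def _terms(part):
--     j = part.find(" OR ")
--     if j < 0:
--         return ["".join(c for c in part if c != '"')]
--     return ["".join(c for c in part[:j] if c != '"')] + _terms(part[j + 4:])
-- ===== Notes on version B (the rewrite author's own statement) =====
-- stated objective: alternative
-- what changed: A builds the result with nested split-then-loop passes and three str.replace passes per piece; B recurses on the first delimiter occurrence found by str.find with slicing, and deletes the unwanted characters with a single character filter per piece.
import Mathlib
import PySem

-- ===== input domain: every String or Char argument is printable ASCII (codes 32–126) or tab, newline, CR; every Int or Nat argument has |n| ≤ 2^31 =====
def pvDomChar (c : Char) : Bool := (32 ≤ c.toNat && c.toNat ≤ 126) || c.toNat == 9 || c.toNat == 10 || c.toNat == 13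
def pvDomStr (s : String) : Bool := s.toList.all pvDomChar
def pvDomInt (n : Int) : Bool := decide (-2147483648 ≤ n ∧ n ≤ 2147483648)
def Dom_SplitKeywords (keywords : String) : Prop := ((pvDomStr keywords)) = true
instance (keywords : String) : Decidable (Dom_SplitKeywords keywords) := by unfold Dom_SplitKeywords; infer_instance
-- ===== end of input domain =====

-- B replaces A's nested split-loops with recursion on the first delimiter occurrence (str.find)
-- and a single character filter per piece; objective: alternative decomposition, same cost.

-- ===== PORT A =====
-- str.split with the nonempty literal separators " AND " / " OR " never raises, so it is
-- PySem.Chars.splitOn on the character lists; str.replace is PySem.Chars.replace.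
def SplitKeywords (keywords : String) : List String :=
  (PySem.Chars.splitOn keywords.toList " AND ".toList).foldl
    (fun out keyword =>
      let keyword := PySem.Chars.replace keyword "(".toList "".toList
      let keyword := PySem.Chars.replace keyword ")".toList "".toList
      (PySem.Chars.splitOn keyword " OR ".toList).foldl
        (fun out searchTerm =>
          out ++ [String.ofList (PySem.Chars.replace searchTerm "\"".toList "".toList)])
        out)
    []

-- ===== PORT B =====
-- ''.join(c for c in s if c not in "()")  /  ... if c != '"'  — a character filter
def pvNoParens (s : List Char) : List Char := s.filter (fun c => !(c == '(' || c == ')'))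
def pvNoQuotes (s : List Char) : List Char := s.filter (fun c => !(c == '"'))

-- _terms: recursion on the first " OR " occurrence; in the else branch j ≥ 0, so the Python
-- slices part[:j] / part[j+4:] are take/drop (PySem.List.slice_to / slice_from).
def pvTerms (part : List Char) : List (List Char) :=
  let j := PySem.Chars.find part " OR ".toList
  if h : j < 0 then [pvNoQuotes part]
  else pvNoQuotes (part.take j.toNat) :: pvTerms (part.drop (j.toNat + 4))
termination_by part.length
decreasing_by
  have h0 : 0 ≤ PySem.Chars.find part " OR ".toList := by omega
  have hsp := (PySem.Chars.find_spec h0).1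
  have hlen := hsp.length_le
  have hsl : (" OR ".toList).length = 4 := by decide
  simp only [List.length_drop, hsl] at *
  omega

-- SplitKeywords of B: recursion on the first " AND " occurrence (i ≥ 0 in the else branch).
def pvSplitAnd (l : List Char) : List (List Char) :=
  let i := PySem.Chars.find l " AND ".toList
  if _h : i < 0 then pvTerms (pvNoParens l)
  else pvTerms (pvNoParens (l.take i.toNat)) ++ pvSplitAnd (l.drop (i.toNat + 5))
termination_by l.length
decreasing_by
  have h0 : 0 ≤ PySem.Chars.find l " AND ".toList := by omega
  have hsp := (PySem.Chars.find_spec h0).1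
  have hlen := hsp.length_le
  have hsl : (" AND ".toList).length = 5 := by decide
  simp only [List.length_drop, hsl] at *
  omega

def SplitKeywords_alt (keywords : String) : List String :=
  (pvSplitAnd keywords.toList).map String.ofList

-- ===== PRECONDITION & SPEC =====
def Spec_SplitKeywords (keywords : String) (out : List String) : Prop := out = SplitKeywords_alt keywords
instance (keywords : String) (out : List String) : Decidable (Spec_SplitKeywords keywords out) := by unfold Spec_SplitKeywords; infer_instance

-- ===== CLAIM (what is proved, stated in full; the proofs are below) =====
def Claim_equal_SplitKeywords : Prop := ∀ (keywords : String), Dom_SplitKeywords keywords → Spec_SplitKeywords keywords (SplitKeywords keywords)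

-- ===== LEMMAS AND PROOFS =====

-- reference splitter used only in the proofs: split at the first occurrence, via find
def pvFSplit (sep : List Char) (hsep : sep ≠ []) (l : List Char) : List (List Char) :=
  if PySem.Chars.find l sep < 0 then [l]
  else l.take (PySem.Chars.find l sep).toNat ::
       pvFSplit sep hsep (l.drop ((PySem.Chars.find l sep).toNat + sep.length))
termination_by l.length
decreasing_by
  have h0 : 0 ≤ PySem.Chars.find l sep := by omega
  have hsp := (PySem.Chars.find_spec h0).1
  have hlen := hsp.length_le
  have hs1 : 1 ≤ sep.length := by cases sep with | nil => exact absurd rfl hsep | cons a t => simp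
  simp only [List.length_drop] at *
  omega

def pvMapHead (f : List Char → List Char) : List (List Char) → List (List Char)
  | [] => []
  | x :: xs => f x :: xs

theorem pvFindGoShift (sep : List Char) (hsep : sep ≠ []) :
    ∀ (l : List Char) (k : Nat), PySem.Chars.find.go sep l k =
      if PySem.Chars.find l sep = -1 then -1 else PySem.Chars.find l sep + k := by
  intro l
  induction l with
  | nil => intro k; simp [PySem.Chars.find, PySem.Chars.find.go, List.isEmpty_iff, hsep]
  | cons c t ih =>
    intro k
    rw [PySem.Chars.find.go.eq_2]
    have hfind : PySem.Chars.find (c :: t) sep =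
        if sep.isPrefixOf (c :: t) = true then 0
        else if PySem.Chars.find t sep = -1 then -1 else PySem.Chars.find t sep + 1 := by
      rw [PySem.Chars.find, PySem.Chars.find.go.eq_2, ih 1]
      split <;> simp
    cases hp : sep.isPrefixOf (c :: t) with
    | true => simp [hp, hfind]
    | false =>
      simp only [hp] at hfind
      simp only [Bool.false_eq_true, if_false] at hfind
      simp only [Bool.false_eq_true, if_false]
      rw [ih (k + 1), hfind]
      have := PySem.Chars.neg_one_le_find t sep
      by_cases h1 : PySem.Chars.find t sep = -1
      · simp [h1]
      · have hne : ¬ (PySem.Chars.find t sep + 1 = -1) := by omega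
        simp only [h1, if_false, hne, if_false]
        omega

theorem pvFindConsPrefix (sep : List Char) (c : Char) (t : List Char)
    (hp : sep.isPrefixOf (c :: t) = true) : PySem.Chars.find (c :: t) sep = 0 := by
  rw [PySem.Chars.find, PySem.Chars.find.go.eq_2]
  simp [hp]

theorem pvFSplit_cons (sep : List Char) (hsep : sep ≠ []) (c : Char) (t : List Char)
    (hp : sep.isPrefixOf (c :: t) = false) :
    pvFSplit sep hsep (c :: t) = pvMapHead (fun x => c :: x) (pvFSplit sep hsep t) := by
  have hfind : PySem.Chars.find (c :: t) sep =
      if PySem.Chars.find t sep = -1 then -1 else PySem.Chars.find t sep + 1 := by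
    rw [PySem.Chars.find, PySem.Chars.find.go.eq_2, pvFindGoShift sep hsep t 1]
    simp [hp]
  have hneg := PySem.Chars.neg_one_le_find t sep
  by_cases h1 : PySem.Chars.find t sep = -1
  · conv_lhs => rw [pvFSplit]
    conv_rhs => rw [pvFSplit]
    simp [hfind, h1, pvMapHead]
  · have hge : 0 ≤ PySem.Chars.find t sep := by omega
    conv_lhs => rw [pvFSplit]
    conv_rhs => rw [pvFSplit]
    simp only [hfind, h1, if_false]
    have hlt1 : ¬ (PySem.Chars.find t sep + 1 < 0) := by omega
    have hlt2 : ¬ (PySem.Chars.find t sep < 0) := by omega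
    simp only [hlt1, if_false, hlt2, if_false]
    have htn : (PySem.Chars.find t sep + 1).toNat = (PySem.Chars.find t sep).toNat + 1 := by omega
    have hdrop : (PySem.Chars.find t sep).toNat + 1 + sep.length
        = ((PySem.Chars.find t sep).toNat + sep.length) + 1 := by omega
    simp [htn, hdrop, pvMapHead, List.take_succ_cons, List.drop_succ_cons]

theorem pvGoSpec (sep : List Char) (hsep : sep ≠ []) (hs1 : 1 ≤ sep.length) :
    ∀ (fuel : Nat) (l cur : List Char) (accl : List (List Char)), l.length ≤ fuel →
      PySem.Chars.splitOn.go sep fuel l cur accl =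
        accl.reverse ++ pvMapHead (fun x => cur.reverse ++ x) (pvFSplit sep hsep l) := by
  intro fuel
  induction fuel with
  | zero =>
    intro l cur accl hl
    have hl0 : l = [] := by cases l <;> simp_all
    subst hl0
    rw [PySem.Chars.splitOn.go.eq_1]
    rw [pvFSplit]
    have : PySem.Chars.find ([] : List Char) sep = -1 := by
      simp [PySem.Chars.find, PySem.Chars.find.go, List.isEmpty_iff, hsep]
    simp [this, pvMapHead]
  | succ n ih =>
    intro l cur accl hl
    cases l with
    | nil =>
      rw [PySem.Chars.splitOn.go.eq_2 _ _ _ _ (by omega)]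
      rw [pvFSplit]
      have : PySem.Chars.find ([] : List Char) sep = -1 := by
        simp [PySem.Chars.find, PySem.Chars.find.go, List.isEmpty_iff, hsep]
      simp [this, pvMapHead]
    | cons c t =>
      rw [PySem.Chars.splitOn.go.eq_3]
      cases hp : sep.isPrefixOf (c :: t) with
      | true =>
        have hfind0 := pvFindConsPrefix sep c t hp
        have hlen : (List.drop sep.length (c :: t)).length ≤ n := by
          simp only [List.length_drop, List.length_cons] at *
          omega
        rw [ih (List.drop sep.length (c :: t)) [] (cur.reverse :: accl) hlen]
        conv_rhs => rw [pvFSplit]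
        simp only [hfind0]
        norm_num
        cases pvFSplit sep hsep (List.drop sep.length (c :: t)) <;> simp [pvMapHead]
      | false =>
        have hlen : t.length ≤ n := by simp at hl; omega
        rw [ih t (c :: cur) accl hlen]
        rw [pvFSplit_cons sep hsep c t hp]
        cases hfs : pvFSplit sep hsep t with
        | nil => simp [pvMapHead]
        | cons x xs => simp [pvMapHead]

theorem pvSplitOnEq (sep : List Char) (hsep : sep ≠ []) (hs1 : 1 ≤ sep.length) (l : List Char) :
    PySem.Chars.splitOn l sep = pvFSplit sep hsep l := by
  rw [PySem.Chars.splitOn, pvGoSpec sep hsep hs1 (l.length + 1) l [] [] (by omega)]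
  cases h : pvFSplit sep hsep l <;> simp [pvMapHead]

theorem pvReplaceGoFilter (ch : Char) :
    ∀ (fuel : Nat) (l acc : List Char), l.length ≤ fuel →
      PySem.Chars.replace.go [ch] [] fuel l acc = acc.reverse ++ l.filter (fun c => !(c == ch)) := by
  intro fuel
  induction fuel with
  | zero =>
    intro l acc hl
    have hl0 : l = [] := by cases l <;> simp_all
    subst hl0
    rw [PySem.Chars.replace.go.eq_1]
    simp
  | succ n ih =>
    intro l acc hl
    cases l with
    | nil => rw [PySem.Chars.replace.go.eq_2 _ _ _ _ (by omega)]; simp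
    | cons c t =>
      rw [PySem.Chars.replace.go.eq_3]
      have hlen : t.length ≤ n := by simp at hl; omega
      cases hc : (ch == c) with
      | true =>
        have hpre : [ch].isPrefixOf (c :: t) = true := by simp [List.isPrefixOf, hc]
        rw [hpre]
        simp only [if_true]
        rw [ih _ _ (by simp; omega)]
        have : (c == ch) = true := by simp_all [BEq.comm]
        simp [this]
      | false =>
        have hpre : [ch].isPrefixOf (c :: t) = false := by simp [List.isPrefixOf, hc]
        rw [hpre]
        simp only [Bool.false_eq_true, if_false]
        rw [ih t (c :: acc) hlen]
        have : (c == ch) = false := by simp_all [BEq.comm]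
        simp [this]

theorem pvReplaceFilter (ch : Char) (l : List Char) :
    PySem.Chars.replace l [ch] [] = l.filter (fun c => !(c == ch)) := by
  rw [PySem.Chars.replace]
  simp only [List.isEmpty_cons]
  rw [if_neg (by simp)]
  rw [pvReplaceGoFilter ch l.length l [] (le_refl _)]
  simp

-- A's two replace passes = B's single paren filter
theorem pvParensEq (l : List Char) :
    PySem.Chars.replace (PySem.Chars.replace l "(".toList "".toList) ")".toList "".toList
      = pvNoParens l := by
  have h1 : "(".toList = ['('] := by decide
  have h2 : ")".toList = [')'] := by decide
  have h3 : "".toList = ([] : List Char) := by decide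
  rw [h1, h2, h3, pvReplaceFilter, pvReplaceFilter, List.filter_filter]
  unfold pvNoParens
  apply List.filter_congr
  intro a _
  cases ha : (a == '(') <;> cases hb : (a == ')') <;> simp_all

theorem pvQuotesEq (l : List Char) :
    PySem.Chars.replace l "\"".toList "".toList = pvNoQuotes l := by
  have h1 : "\"".toList = ['"'] := by decide
  have h3 : "".toList = ([] : List Char) := by decide
  rw [h1, h3, pvReplaceFilter]
  rfl

theorem pvTermsEq (p : List Char) :
    pvTerms p = (pvFSplit " OR ".toList (by decide) p).map pvNoQuotes := by
  rw [pvTerms]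
  rw [pvFSplit]
  split
  · simp
  · rw [pvTermsEq]
    simp
termination_by p.length
decreasing_by
  rename_i h
  have h0 : 0 ≤ PySem.Chars.find p " OR ".toList := by omega
  have hsp := (PySem.Chars.find_spec h0).1
  have hlen := hsp.length_le
  have hsl : (" OR ".toList).length = 4 := by decide
  simp only [List.length_drop, hsl] at *
  omega

theorem pvSplitAndEq (l : List Char) :
    pvSplitAnd l = (pvFSplit " AND ".toList (by decide) l).flatMap
      (fun kw => pvTerms (pvNoParens kw)) := by
  rw [pvSplitAnd]
  rw [pvFSplit]
  split
  · simp
  · rw [pvSplitAndEq]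
    simp
termination_by l.length
decreasing_by
  rename_i h
  have h0 : 0 ≤ PySem.Chars.find l " AND ".toList := by omega
  have hsp := (PySem.Chars.find_spec h0).1
  have hlen := hsp.length_le
  have hsl : (" AND ".toList).length = 5 := by decide
  simp only [List.length_drop, hsl] at *
  omega

-- ===== VERDICT (by name: the statement is the Claim_ definition above) =====
theorem SplitKeywords_spec : Claim_equal_SplitKeywords := by
  intro keywords _
  unfold Spec_SplitKeywords SplitKeywords SplitKeywords_alt
  rw [pvSplitOnEq " AND ".toList (by decide) (by decide) keywords.toList]
  simp only [pvSplitOnEq " OR ".toList (by decide) (by decide)]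
  simp only [PySem.List.foldl_append_singleton_eq_map]
  rw [PySem.List.foldl_append_eq_flatMap
    (fun keyword => (pvFSplit " OR ".toList (by decide)
      (PySem.Chars.replace (PySem.Chars.replace keyword "(".toList "".toList) ")".toList "".toList)).map
        (fun searchTerm => String.ofList (PySem.Chars.replace searchTerm "\"".toList "".toList)))]
  rw [pvSplitAndEq]
  simp only [pvParensEq, pvQuotesEq]
  simp [List.map_flatMap, pvTermsEq, Function.comp_def]
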